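-- pv_equiv track=rewrite | github.com/bpattonstevens/CS-115 | CS115B/In Class Exercises/life.py | diagonalize
-- ===== SOURCE A (Python) =====
-- def createOneRow(width):
--     """ returns one row of zeros of width "width"...
--          You might use this in your createBoard(width, height) function """
--     row = []
--     # print "width is", width
--     for _ in range(width):
--         row += [0]
--     return row
--
-- def createBoard(width, height):
--     """ returns a 2d array of width and height """
--     A = []
--     for _ in range(height):
--         A += [createOneRow(width)]
--     return A
--
-- def diagonalize(width,height):
--     """ creates an empty board and then modifies it
--     so that it has a diagonal strip of "on" cells."""
--     A = createBoard( width, height )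
--     for row in range(height):
--         for col in range(width):
--             if row == col:
--                 A[row][col] = 1
--             else:
--                 A[row][col] = 0
--     return A
-- ===== SOURCE B (Python) =====
-- def oneRow(width, r):
--     """row r of the diagonal board: a single 1 spliced into zeros (all zeros if r >= width)"""
--     if r < width:
--         return [0] * r + [1] + [0] * (width - r - 1)
--     return [0] * width
--
-- def diagonalize(width, height):
--     return [oneRow(width, r) for r in range(height)]
-- ===== Notes on version B (the rewrite author's own statement) =====
-- stated objective: faster
-- what changed: A appends zeros cell by cell, then mutates every cell of the width x height board in a nested scan with a row==col branch; B never mutates: it builds each row directly as the closed-form splice [0]*r + [1] + [0]*(width-r-1) (all zeros when r >= width), avoiding the per-cell append/branch/assignment work.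
import Mathlib
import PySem

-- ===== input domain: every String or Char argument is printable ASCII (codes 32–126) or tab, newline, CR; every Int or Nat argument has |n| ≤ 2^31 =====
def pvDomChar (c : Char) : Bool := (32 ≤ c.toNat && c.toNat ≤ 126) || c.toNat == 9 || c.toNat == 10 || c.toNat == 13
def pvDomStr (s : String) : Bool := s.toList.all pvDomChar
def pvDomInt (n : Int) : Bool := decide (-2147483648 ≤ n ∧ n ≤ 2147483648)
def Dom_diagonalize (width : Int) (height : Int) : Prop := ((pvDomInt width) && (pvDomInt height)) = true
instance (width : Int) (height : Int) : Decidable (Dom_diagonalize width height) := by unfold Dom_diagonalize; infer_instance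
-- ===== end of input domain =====

-- B replaces A's board mutation (build a zero board, then rewrite every cell in a nested
-- width×height scan) by a pure construction: each row is the closed-form splice
-- [0]*r ++ [1] ++ [0]*(width-r-1), no board is ever modified.

-- ===== PORT A =====
def createOneRowA (width : Int) : List Int :=
  (PySem.List.pyRange 0 width 1).foldl (fun row _ => row ++ [0]) []

def createBoardA (width : Int) (height : Int) : List (List Int) :=
  (PySem.List.pyRange 0 height 1).foldl (fun A _ => A ++ [createOneRowA width]) []

-- A[row][col] = v : both indices are range indices, hence nonnegative and in bounds,
-- so List.set with .toNat is exact here.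
def diagonalize (width : Int) (height : Int) : List (List Int) :=
  (PySem.List.pyRange 0 height 1).foldl (fun A row =>
    (PySem.List.pyRange 0 width 1).foldl (fun A col =>
      A.set row.toNat ((A.getD row.toNat []).set col.toNat (if row == col then 1 else 0))) A)
    (createBoardA width height)

-- ===== PORT B =====
def oneRowB (width : Int) (r : Int) : List Int :=
  if r < width then
    List.replicate r.toNat 0 ++ [1] ++ List.replicate (width - r - 1).toNat 0
  else
    List.replicate width.toNat 0

def diagonalize_alt (width : Int) (height : Int) : List (List Int) :=
  (PySem.List.pyRange 0 height 1).map (oneRowB width)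

-- ===== PRECONDITION & SPEC =====
def Spec_diagonalize (width : Int) (height : Int) (out : List (List Int)) : Prop := out = diagonalize_alt width height
instance (width : Int) (height : Int) (out : List (List Int)) : Decidable (Spec_diagonalize width height out) := by unfold Spec_diagonalize; infer_instance

-- ===== CLAIM (what is proved, stated in full; the proofs are below) =====
def Claim_equal_diagonalize : Prop := ∀ (width : Int) (height : Int), Dom_diagonalize width height → Spec_diagonalize width height (diagonalize width height)

-- ===== LEMMAS AND PROOFS =====

-- the diagonal row r of a width-w board, and the full target board
def diagRow (w : Int) (r : Nat) : List Int :=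
  (List.range w.toNat).map (fun c => if r = c then 1 else 0)

def target (w h : Int) : List (List Int) :=
  (List.range h.toNat).map (diagRow w)

lemma createOneRowA_eq (w : Int) : createOneRowA w = List.replicate w.toNat 0 := by
  unfold createOneRowA
  rw [show (fun (row : List Int) (_ : Int) => row ++ [0]) = fun row x => row ++ [(fun _ => (0:Int)) x] from rfl,
      PySem.List.foldl_append_singleton_eq_map]
  simp [PySem.List.length_pyRange_one]

lemma createBoardA_eq (w h : Int) :
    createBoardA w h = List.replicate h.toNat (List.replicate w.toNat 0) := by
  unfold createBoardA
  rw [show (fun (A : List (List Int)) (_ : Int) => A ++ [createOneRowA w]) =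
        fun A x => A ++ [(fun _ => createOneRowA w) x] from rfl,
      PySem.List.foldl_append_singleton_eq_map]
  simp [PySem.List.length_pyRange_one, createOneRowA_eq]

-- a fold that only ever rewrites row n factors through that row
lemma foldl_set_row {β : Type} (g : List Int → β → List Int) :
    ∀ (cs : List β) (A : List (List Int)) (n : Nat), n < A.length →
      cs.foldl (fun A c => A.set n (g (A.getD n []) c)) A = A.set n (cs.foldl g (A.getD n [])) := by
  intro cs
  induction cs with
  | nil =>
      intro A n hn
      simp [List.getD, List.getElem?_eq_getElem hn, List.set_getElem_self]
  | cons c cs ih =>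
      intro A n hn
      simp only [List.foldl_cons]
      rw [ih _ n (by simpa using hn)]
      simp [List.getD, hn, List.set_set]

-- writing f i at every index i < n of a row
lemma foldl_set_range (f : Nat → Int) :
    ∀ (n : Nat) (row : List Int), n ≤ row.length →
      (List.range n).foldl (fun r i => r.set i (f i)) row
        = (List.range n).map f ++ row.drop n := by
  intro n
  induction n with
  | zero => intro row _; simp
  | succ n ih =>
      intro row hn
      rw [List.range_succ, List.foldl_append, ih row (by omega)]
      have hlen : ((List.range n).map f).length = n := by simp
      simp only [List.foldl_cons, List.foldl_nil]
      rw [List.set_append, hlen, if_neg (lt_irrefl n), Nat.sub_self]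
      have hdrop : row.drop n = row[n] :: row.drop (n+1) :=
        (List.drop_eq_getElem_cons (by omega))
      rw [hdrop, List.set_cons_zero]
      simp

-- A's Int-cast diagonal test coincides with the Nat one
lemma diagFun_eq (r : Nat) :
    (fun c : Nat => if ((r : Int) == (c : Int)) then (1 : Int) else 0)
      = fun c => if r = c then 1 else 0 := by
  funext c
  rcases eq_or_ne r c with rfl | h
  · simp
  · simp [h]

-- the fully written diagonal row equals diagRow
lemma rowFold_eq (w : Int) (r : Nat) :
    (List.range w.toNat).foldl
        (fun row c => row.set c (if ((r : Int) == (c : Int)) then 1 else 0))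
        (List.replicate w.toNat 0) = diagRow w r := by
  rw [foldl_set_range (fun c => if ((r : Int) == (c : Int)) then 1 else 0) w.toNat _ (by simp)]
  simp only [List.drop_replicate, Nat.sub_self, List.replicate_zero, List.append_nil]
  rw [diagFun_eq r]
  rfl

-- A's outer loop, m rows in
lemma boardA_fold (w h : Int) :
    ∀ (m : Nat), m ≤ h.toNat →
      (List.range m).foldl (fun A r =>
          (List.range w.toNat).foldl
            (fun A c => A.set r ((A.getD r []).set c (if ((r:Int) == (c:Int)) then 1 else 0))) A)
        (List.replicate h.toNat (List.replicate w.toNat 0))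
      = (List.range m).map (diagRow w)
          ++ List.replicate (h.toNat - m) (List.replicate w.toNat 0) := by
  intro m
  induction m with
  | zero => simp
  | succ m ih =>
      intro hm
      rw [List.range_succ, List.foldl_append, ih (by omega)]
      simp only [List.foldl_cons, List.foldl_nil]
      set P := (List.range m).map (diagRow w) with hP
      have hPlen : P.length = m := by simp [hP]
      have hgetD : (P ++ List.replicate (h.toNat - m) (List.replicate w.toNat (0:Int))).getD m []
          = List.replicate w.toNat 0 := by
        rw [List.getD, List.getElem?_append_right hPlen.le, hPlen, Nat.sub_self,
            List.getElem?_replicate, if_pos (by omega : 0 < h.toNat - m)]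
        rfl
      rw [foldl_set_row (fun row c => row.set c (if ((m:Int) == (c:Int)) then 1 else 0))
            (List.range w.toNat) _ m
            (by rw [List.length_append, hPlen, List.length_replicate]; omega),
          hgetD, rowFold_eq]
      rw [List.set_append, hPlen, if_neg (lt_irrefl m), Nat.sub_self]
      have hrep : h.toNat - m = (h.toNat - (m + 1)) + 1 := by omega
      rw [hrep, List.replicate_succ, List.set_cons_zero]
      simp [hP]

lemma diagonalize_eq_target (w h : Int) : diagonalize w h = target w h := by
  unfold diagonalize
  rw [createBoardA_eq, PySem.List.pyRange_one 0 h, PySem.List.pyRange_one 0 w,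
      List.foldl_map]
  simp only [Int.sub_zero, zero_add, List.foldl_map, Int.toNat_natCast]
  rw [boardA_fold w h h.toNat le_rfl]
  simp [target]

-- B's spliced row is exactly the diagonal row
lemma oneRowB_eq (w : Int) (r : Nat) : oneRowB w (r : Int) = diagRow w r := by
  unfold oneRowB
  split_ifs with hlt
  · apply List.ext_getElem
    · simp [diagRow]; omega
    · intro c h1 h2
      simp only [diagRow, List.getElem_map, List.getElem_range]
      have hr : (r : Int).toNat = r := Int.toNat_natCast r
      by_cases hc : c < r
      · rw [List.getElem_append_left (by simp [hr]; omega),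
            List.getElem_append_left (by simp [hr]; omega),
            List.getElem_replicate, if_neg (by omega)]
      · by_cases hce : c = r
        · subst hce
          simp [hr]
        · rw [List.getElem_append_right (by simp [hr]; omega)]
          simp only [List.length_append, List.length_replicate, List.length_cons,
            List.length_nil, hr]
          rw [List.getElem_replicate, if_neg (by omega)]
  · apply List.ext_getElem
    · simp [diagRow]
    · intro c h1 h2
      simp only [List.length_replicate] at h1
      simp only [diagRow, List.getElem_map, List.getElem_range, List.getElem_replicate]
      rw [if_neg (by omega)]

lemma diagonalize_alt_eq_target (w h : Int) : diagonalize_alt w h = target w h := by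
  unfold diagonalize_alt
  rw [PySem.List.pyRange_one 0 h]
  simp only [Int.sub_zero, zero_add, List.map_map]
  unfold target
  apply List.map_congr_left
  intro r _
  exact oneRowB_eq w r

-- ===== VERDICT (by name: the statement is the Claim_ definition above) =====
theorem diagonalize_spec : Claim_equal_diagonalize := by
  intro w h _
  unfold Spec_diagonalize
  rw [diagonalize_eq_target, diagonalize_alt_eq_target]
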